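-- pv_equiv track=rewrite | github.com/0xMousa/compier | cmpier.py | haveAeq
-- ===== SOURCE A (Python) =====
-- pro  = { '*' : 10 , '/':10 , '+':9,'-':9,'>':8,'<':8,'<=':8,'>=':8,'==':8,'|':6,'&':7,'=':5,'go to exit':5}
--
-- def opp(p,s):
--     x=''
--     while p < len(s) and s[p] in pro.keys():
--         x+=s[p]
--         p+=1
--     return x,p
--
-- def haveAeq(pos,s):
--     while len(s) > pos:
--         if s[pos] == '=':
--             x,p =opp(pos,s)
--             if x == '=':
--                 return True
--             else :return False
--         elif s[pos] == ' ':
--             pos+=1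
--         else:
--             return False
-- ===== SOURCE B (Python) =====
-- pro  = { '*' : 10 , '/':10 , '+':9,'-':9,'>':8,'<':8,'<=':8,'>=':8,'==':8,'|':6,'&':7,'=':5,'go to exit':5}
--
-- def haveAeq(pos, s):
--     # skip spaces in place, then peek one character ahead instead of
--     # accumulating the whole operator run
--     while pos < len(s) and s[pos] == ' ':
--         pos += 1
--     if pos >= len(s):
--         return None
--     if s[pos] != '=':
--         return False
--     return pos + 1 >= len(s) or s[pos + 1] not in pro
-- ===== Notes on version B (the rewrite author's own statement) =====
-- stated objective: simpler
-- what changed: Drops the opp helper and its operator-run accumulation: B skips spaces in place and decides with a single one-character lookahead (next char past '=' absent or not an operator key) instead of building the full operator string and comparing it to '='.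
import Mathlib
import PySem

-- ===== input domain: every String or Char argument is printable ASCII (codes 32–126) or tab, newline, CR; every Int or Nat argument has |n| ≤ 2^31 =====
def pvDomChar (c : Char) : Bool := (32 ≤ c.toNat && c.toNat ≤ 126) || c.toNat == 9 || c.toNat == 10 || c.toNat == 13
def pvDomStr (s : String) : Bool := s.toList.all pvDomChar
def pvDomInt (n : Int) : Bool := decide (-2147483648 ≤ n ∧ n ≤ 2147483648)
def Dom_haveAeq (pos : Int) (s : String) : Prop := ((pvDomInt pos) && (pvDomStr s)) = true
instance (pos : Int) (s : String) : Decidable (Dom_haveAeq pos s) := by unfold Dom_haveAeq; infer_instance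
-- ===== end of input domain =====

-- B drops the opp helper: it skips spaces in place and decides with a single
-- one-character lookahead instead of accumulating the operator run (objective: simpler).

-- ===== PORT A =====
-- the module-level dict pro (insertion order kept)
def pvPro : PySem.Dict String Int :=
  PySem.Dict.mk
    [("*", 10), ("/", 10), ("+", 9), ("-", 9), (">", 8), ("<", 8), ("<=", 8),
     (">=", 8), ("==", 8), ("|", 6), ("&", 7), ("=", 5), ("go to exit", 5)]

-- opp's while loop; x accumulated as List Char (the string being built).
-- fuel = remaining distance to the end of the string; the guard p < len keeps it exact.
def pvOppLoop (cs : List Char) (p : Int) (x : List Char) : Nat → List Char × Int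
  | 0 => (x, p)
  | fuel + 1 =>
    if p < (cs.length : Int) then
      match PySem.List.pyGet? cs p with
      | some c =>
        if String.ofList [c] ∈ pvPro.keys then
          pvOppLoop cs (p + 1) (x ++ [c]) fuel
        else (x, p)
      | none => (x, p)   -- s[p] would raise: outside Pre_, never reached inside it
    else (x, p)

-- the main while loop of haveAeq (opp is called with x initially '')
def pvHaveAeqLoop (cs : List Char) (pos : Int) : Nat → Option Bool
  | 0 => none
  | fuel + 1 =>
    if (cs.length : Int) > pos then
      match PySem.List.pyGet? cs pos with
      | some c =>
        if c = '=' then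
          if (pvOppLoop cs pos [] ((cs.length : Int) - pos).toNat).1 = ['='] then
            some true
          else some false
        else if c = ' ' then pvHaveAeqLoop cs (pos + 1) fuel
        else some false
      | none => none   -- s[pos] would raise: outside Pre_
    else none

def haveAeq (pos : Int) (s : String) : Option Bool :=
  pvHaveAeqLoop s.toList pos ((s.toList.length : Int) - pos).toNat

-- ===== PORT B =====
-- B's space-skipping while loop
def pvSkip (cs : List Char) (pos : Int) : Nat → Int
  | 0 => pos
  | fuel + 1 =>
    if pos < (cs.length : Int) ∧ PySem.List.pyGet? cs pos = some ' ' then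
      pvSkip cs (pos + 1) fuel
    else pos

-- B's body after the skip loop, on the code-point list
def pvAltBody (cs : List Char) (p : Int) : Option Bool :=
  if p ≥ (cs.length : Int) then none
  else
    match PySem.List.pyGet? cs p with
    | none => none   -- s[p] would raise: outside Pre_
    | some c =>
      if c ≠ '=' then some false
      else if p + 1 ≥ (cs.length : Int) then some true
      else
        match PySem.List.pyGet? cs (p + 1) with
        | none => some true   -- unreachable inside Pre_
        | some d => some (!(decide (String.ofList [d] ∈ pvPro.keys)))

def haveAeq_alt (pos : Int) (s : String) : Option Bool :=
  pvAltBody s.toList (pvSkip s.toList pos ((s.toList.length : Int) - pos).toNat)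

-- ===== PRECONDITION & SPEC =====
-- Pre_ excludes exactly the inputs with pos < -len(s), on which Python A raises
-- IndexError at s[pos] (B raises there too).
def Pre_haveAeq (pos : Int) (s : String) : Prop := -(s.toList.length : Int) ≤ pos
instance (pos : Int) (s : String) : Decidable (Pre_haveAeq pos s) := by unfold Pre_haveAeq; infer_instance
def pvWitness_haveAeq : Int × String := (0, " = x")

def Spec_haveAeq (pos : Int) (s : String) (out : Option Bool) : Prop := out = haveAeq_alt pos s
instance (pos : Int) (s : String) (out : Option Bool) : Decidable (Spec_haveAeq pos s out) := by unfold Spec_haveAeq; infer_instance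

-- ===== CLAIM (what is proved, stated in full; the proofs are below) =====
def Claim_equal_haveAeq : Prop := ∀ (pos : Int) (s : String), Dom_haveAeq pos s → Pre_haveAeq pos s → Spec_haveAeq pos s (haveAeq pos s)

-- ===== LEMMAS AND PROOFS =====

-- an in-range index always yields a character
theorem pvGetSome (cs : List Char) (i : Int) (h1 : -(cs.length : Int) ≤ i)
    (h2 : i < (cs.length : Int)) : ∃ c, PySem.List.pyGet? cs i = some c := by
  cases h : PySem.List.pyGet? cs i with
  | none =>
    have := (PySem.List.pyGet?_eq_none_iff cs i).1 h
    exact absurd ⟨h1, h2⟩ this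
  | some c => exact ⟨c, rfl⟩

-- the accumulator of opp's loop only grows
theorem pvOppLoop_length (cs : List Char) :
    ∀ (fuel : Nat) (p : Int) (x : List Char), x.length ≤ (pvOppLoop cs p x fuel).1.length := by
  intro fuel
  induction fuel with
  | zero => intro p x; simp [pvOppLoop]
  | succ n ih =>
    intro p x
    simp only [pvOppLoop]
    split
    · cases h : PySem.List.pyGet? cs p with
      | none => simp
      | some c =>
        simp only []
        split
        · calc x.length ≤ (x ++ [c]).length := by simp
            _ ≤ _ := ih (p + 1) (x ++ [c])
        · simp
    · simp

-- main equivalence, by induction on the (shared) fuel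
theorem pvMain (cs : List Char) :
    ∀ (fuel : Nat) (pos : Int), -(cs.length : Int) ≤ pos →
      fuel = ((cs.length : Int) - pos).toNat →
      pvHaveAeqLoop cs pos fuel = pvAltBody cs (pvSkip cs pos fuel) := by
  intro fuel
  induction fuel with
  | zero =>
    intro pos hlo hf
    have hge : (cs.length : Int) ≤ pos := by omega
    simp [pvHaveAeqLoop, pvSkip, pvAltBody, hge]
  | succ n ih =>
    intro pos hlo hf
    have hlt : pos < (cs.length : Int) := by omega
    obtain ⟨c, hc⟩ := pvGetSome cs pos hlo hlt
    by_cases hsp : c = ' '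
    · -- space: both loops step to pos+1
      subst hsp
      have hA : pvHaveAeqLoop cs pos (n + 1) = pvHaveAeqLoop cs (pos + 1) n := by
        simp [pvHaveAeqLoop, hlt, hc]
      have hS : pvSkip cs pos (n + 1) = pvSkip cs (pos + 1) n := by
        simp [pvSkip, hlt, hc]
      rw [hA, hS]
      exact ih (pos + 1) (by omega) (by omega)
    · -- non-space: the skip loop stops at pos, A's loop decides here
      have hS : pvSkip cs pos (n + 1) = pos := by
        simp [pvSkip, hc, hsp]
      rw [hS]
      by_cases heq : c = '='
      · subst heq
        -- A: opp from pos; its first step consumes '=' (a key of pro)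
        have hkey : String.ofList ['='] ∈ pvPro.keys := by decide
        have hfuel : ((cs.length : Int) - pos).toNat = n + 1 := hf.symm
        have hopp1 : pvOppLoop cs pos [] (n + 1) = pvOppLoop cs (pos + 1) ['='] n := by
          simp [pvOppLoop, hlt, hc, hkey]
        by_cases hend : (cs.length : Int) ≤ pos + 1
        · -- '=' is the last char: opp stops with x = ['=']; both sides give true
          have hn : n = 0 := by omega
          have hopp2 : pvOppLoop cs (pos + 1) ['='] n = (['='], pos + 1) := by
            rw [hn]; simp [pvOppLoop]
          simp [pvHaveAeqLoop, pvAltBody, hlt, hc, hfuel, hopp1, hopp2]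
          omega
        · replace hend : pos + 1 < (cs.length : Int) := by omega
          obtain ⟨d, hd⟩ := pvGetSome cs (pos + 1) (by omega) hend
          by_cases hdk : String.ofList [d] ∈ pvPro.keys
          · -- next char is an operator key: opp's x grows past length 1, so x ≠ ['=']
            obtain ⟨m, rfl⟩ : ∃ m, n = m + 1 := ⟨n - 1, by omega⟩
            have hopp2 : pvOppLoop cs (pos + 1) ['='] (m + 1) =
                pvOppLoop cs (pos + 1 + 1) ['=', d] m := by
              simp only [pvOppLoop]
              rw [if_pos (by omega), hd]
              simp [hdk]
            have hlen : 2 ≤ (pvOppLoop cs pos [] (m + 1 + 1)).1.length := by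
              rw [hopp1, hopp2]
              exact pvOppLoop_length cs m (pos + 1 + 1) ['=', d]
            have hne : (pvOppLoop cs pos [] (m + 1 + 1)).1 ≠ ['='] := by
              intro h; rw [h] at hlen; simp at hlen
            simp [pvHaveAeqLoop, pvAltBody, hlt, hc, hfuel, hne, hd, hdk]
            omega
          · -- next char is not a key: opp stops with x = ['=']; both sides give true
            have hopp2 : pvOppLoop cs (pos + 1) ['='] n = (['='], pos + 1) := by
              cases n with
              | zero => omega
              | succ m =>
                simp only [pvOppLoop]
                rw [if_pos (by omega), hd]
                simp [hdk]
            simp [pvHaveAeqLoop, pvAltBody, hlt, hc, hfuel, hopp1, hopp2, hd, hdk]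
      · -- any other char: both return some false
        simp [pvHaveAeqLoop, pvAltBody, hlt, hc, heq, hsp]

-- ===== VERDICT (by name: the statement is the Claim_ definition above) =====
theorem haveAeq_spec : Claim_equal_haveAeq := by
  intro pos s _ hpre
  unfold Spec_haveAeq haveAeq haveAeq_alt
  exact pvMain s.toList _ pos hpre rfl
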